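-- pv_equiv track=rewrite | github.com/sajid36/leetcode | increasing-decreasing-string/increasing-decreasing-string.py | sortString
-- ===== SOURCE A (Python) =====
-- def sortString(s: str) -> str:
--     res = ""
--     while(True):
--         ordered = sorted(set(s))
--         res = res+"".join(ordered)
--         for i in range(len(ordered)):
--             s = s.replace(ordered[i], '', 1)
--         if(len(s)==0): break
--         ordered = sorted(set(s))
--         res = res+"".join(ordered[::-1])
--         for i in range(len(ordered)):
--             s = s.replace(ordered[i], '', 1)
--         if(len(s)==0): break
--
--     return res
-- ===== SOURCE B (Python) =====
-- def sortString(s: str) -> str: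
--     # Count each distinct character once, then sweep the sorted alphabet
--     # alternately up and down, emitting every character that still has a
--     # positive count; O(n + k*rounds) instead of repeated sort+replace.
--     chars = sorted(set(s))
--     pairs = [[c, s.count(c)] for c in chars]
--     out = []
--     remaining = len(s)
--     forward = True
--     while remaining:
--         seq = pairs if forward else pairs[::-1]
--         for p in seq:
--             if p[1]:
--                 out.append(p[0])
--                 p[1] -= 1
--                 remaining -= 1
--         forward = not forward
--     return ''.join(out)
-- ===== Notes on version B (the rewrite author's own statement) =====
-- stated objective: faster
-- what changed: B replaces A's repeated sort(set(s)) + one-at-a-time str.replace passes by a single count pass over the sorted distinct characters, then sweeps the count table alternately up and down, decrementing counts.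
import Mathlib
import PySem

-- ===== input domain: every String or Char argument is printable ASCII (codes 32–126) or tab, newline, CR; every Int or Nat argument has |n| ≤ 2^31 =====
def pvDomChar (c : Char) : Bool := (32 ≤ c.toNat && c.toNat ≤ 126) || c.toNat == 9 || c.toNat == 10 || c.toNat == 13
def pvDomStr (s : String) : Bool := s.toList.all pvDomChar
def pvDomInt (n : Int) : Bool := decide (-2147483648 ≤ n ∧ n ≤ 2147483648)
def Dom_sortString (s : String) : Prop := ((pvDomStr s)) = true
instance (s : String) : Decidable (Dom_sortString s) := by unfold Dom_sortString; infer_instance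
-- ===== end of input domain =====

-- B counts each distinct character once and sweeps the sorted count table alternately
-- up and down instead of A's repeated sort(set)+replace passes; return values proved equal.

-- ===== PORT A =====
-- termination helper for the loop (cited by decreasing_by below)
theorem pvLen_foldl_erase_le (d : List Char) : ∀ (u : List Char),
    (d.foldl (fun t c => t.erase c) u).length ≤ u.length := by
  induction d with
  | nil => intro u; simp
  | cons a d ih =>
    intro u
    calc (List.foldl (fun t c => t.erase c) (u.erase a) d).length
        ≤ (u.erase a).length := ih _
      _ ≤ u.length := List.length_erase_le

-- 's.replace(ordered[i], '', 1)' for a single character present once-or-more, with empty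
-- replacement and count 1, removes exactly the first occurrence: this is List.erase.
-- The loop 'for i in range(len(ordered)): s = s.replace(...)' is the foldl of erase over ordered.
-- res is built as a List Char and turned into a String once at the end ("".join semantics).
def sortStringLoop (s : List Char) (res : List Char) : List Char :=
  let ordered := PySem.List.sorted (PySem.Set.ofList s) (fun x => x) false
  let res1 := res ++ ordered
  let s1 := ordered.foldl (fun t c => t.erase c) s
  if h1 : s1 = [] then res1
  else
    let ordered2 := PySem.List.sorted (PySem.Set.ofList s1) (fun x => x) false
    let res2 := res1 ++ ordered2.reverse
    let s2 := ordered2.foldl (fun t c => t.erase c) s1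
    if h2 : s2 = [] then res2 else sortStringLoop s2 res2
termination_by s.length
decreasing_by
  · -- s2 nonempty, hence s1 nonempty; one full erase round is strictly shorter
    rcases hs1 : PySem.List.sorted (PySem.Set.ofList s1) (fun x => x) false with _ | ⟨c, d⟩
    · exfalso
      rcases List.exists_mem_of_ne_nil s1 h1 with ⟨a, ha⟩
      have : a ∈ PySem.List.sorted (PySem.Set.ofList s1) (fun x => x) false := by
        simpa [PySem.List.mem_sorted, PySem.Set.mem_ofList] using ha
      rw [hs1] at this; exact absurd this (List.not_mem_nil)
    · have hc : c ∈ s1 := by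
        have : c ∈ PySem.List.sorted (PySem.Set.ofList s1) (fun x => x) false := by
          rw [hs1]; exact List.mem_cons_self
        simpa [PySem.List.mem_sorted, PySem.Set.mem_ofList] using this
      calc (List.foldl (fun t c => t.erase c) s1 (c :: d)).length
          ≤ (s1.erase c).length := by simpa using pvLen_foldl_erase_le d (s1.erase c)
        _ < s1.length := by
            have := List.length_erase_of_mem hc
            have hpos : 0 < s1.length := List.length_pos_iff.mpr h1
            omega
        _ ≤ s.length := pvLen_foldl_erase_le _ s

def sortString (s : String) : String := String.ofList (sortStringLoop s.toList [])

-- ===== PORT B =====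
-- one 'for p in seq' pass: emits p[0] and decrements p[1] wherever p[1] != 0
def sweepAlt : List (Char × Int) → List (Char × Int) × List Char
  | [] => ([], [])
  | (c, k) :: rest =>
    if k ≠ 0 then
      let (r, o) := sweepAlt rest
      ((c, k - 1) :: r, c :: o)
    else
      let (r, o) := sweepAlt rest
      ((c, k) :: r, o)

-- the 'while remaining:' loop; fuel is a totality guard only (len(s)+1 suffices, see proof)
def loopAlt : Nat → List (Char × Int) → Int → Bool → List Char → List Char
  | 0, _, _, _, out => out
  | fuel + 1, pairs, remaining, forward, out =>
    if remaining = 0 then out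
    else if forward then
      let pa := sweepAlt pairs          -- pa.1 = updated pairs, pa.2 = appended characters
      loopAlt fuel pa.1 (remaining - pa.2.length) false (out ++ pa.2)
    else
      let pa := sweepAlt pairs.reverse
      loopAlt fuel pa.1.reverse (remaining - pa.2.length) true (out ++ pa.2)

-- s.count(c) for a single character c is the character count: ported as List.count (exact)
def sortString_alt (s : String) : String :=
  let chars := PySem.List.sorted (PySem.Set.ofList s.toList) (fun x => x) false
  let pairs := chars.map (fun c => (c, (s.toList.count c : Int)))
  String.ofList (loopAlt (s.toList.length + 1) pairs (s.toList.length : Int) true [])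

-- ===== PRECONDITION & SPEC =====
def Spec_sortString (s : String) (out : String) : Prop := out = sortString_alt s
instance (s : String) (out : String) : Decidable (Spec_sortString s out) := by unfold Spec_sortString; infer_instance

-- ===== CLAIM (what is proved, stated in full; the proofs are below) =====
def Claim_equal_sortString : Prop := ∀ (s : String), Dom_sortString s → Spec_sortString s (sortString s)


-- ===== LEMMAS AND PROOFS =====

-- abbreviations for the proofs: sorted(set(u)) and the one-of-each erase round
def pvSD (u : List Char) : List Char := PySem.List.sorted (PySem.Set.ofList u) (fun x => x) false
def pvErase (d u : List Char) : List Char := d.foldl (fun t c => t.erase c) u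

theorem pvSD_def (u : List Char) :
    PySem.List.sorted (PySem.Set.ofList u) (fun x => x) false = pvSD u := rfl
theorem pvErase_def (d u : List Char) : d.foldl (fun t c => t.erase c) u = pvErase d u := rfl

theorem pvSD_mem (u : List Char) (c : Char) : c ∈ pvSD u ↔ c ∈ u := by
  simp [pvSD, PySem.List.mem_sorted, PySem.Set.mem_ofList]

theorem pvSD_pairwise (u : List Char) : (pvSD u).Pairwise (· < ·) :=
  PySem.List.sorted_ofList_pairwise_lt u

theorem pvSD_nodup (u : List Char) : (pvSD u).Nodup :=
  (pvSD_pairwise u).imp (fun h => ne_of_lt h)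

theorem pvSD_nil : pvSD [] = [] := by decide

theorem pvErase_nil_nil : pvErase (pvSD []) [] = [] := by rw [pvSD_nil]; rfl

theorem pvCount_erase (d : List Char) : ∀ (u : List Char) (c : Char),
    (pvErase d u).count c = u.count c - d.count c := by
  induction d with
  | nil => intro u c; simp [pvErase]
  | cons a d ih =>
    intro u c
    have hstep : pvErase (a :: d) u = pvErase d (u.erase a) := rfl
    rw [hstep, ih, List.count_erase, List.count_cons]
    simp only [beq_iff_eq]
    split_ifs <;> omega

theorem pvLen_erase (d : List Char) : ∀ (u : List Char), d.Nodup → (∀ a ∈ d, a ∈ u) →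
    (pvErase d u).length = u.length - d.length := by
  induction d with
  | nil => intro u _ _; simp [pvErase]
  | cons a d ih =>
    intro u hnd hsub
    obtain ⟨hna, hndd⟩ := List.nodup_cons.mp hnd
    have ha : a ∈ u := hsub a List.mem_cons_self
    have hstep : pvErase (a :: d) u = pvErase d (u.erase a) := rfl
    have hsub' : ∀ b ∈ d, b ∈ u.erase a := fun b hb =>
      (List.mem_erase_of_ne (by rintro rfl; exact hna hb)).mpr (hsub b (List.mem_cons_of_mem a hb))
    rw [hstep, ih (u.erase a) hndd hsub', List.length_erase_of_mem ha]
    have hpos : 0 < u.length := List.length_pos_iff.mpr (List.ne_nil_of_mem ha)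
    simp only [List.length_cons]
    omega

theorem pvMem_erase_mem (d u : List Char) (c : Char) (h : c ∈ pvErase d u) : c ∈ u := by
  have h1 : 0 < (pvErase d u).count c := List.count_pos_iff.mpr h
  rw [pvCount_erase] at h1
  exact List.count_pos_iff.mp (by omega)

theorem pvRound_lt (u : List Char) (hu : u ≠ []) : (pvErase (pvSD u) u).length < u.length := by
  rcases List.exists_mem_of_ne_nil u hu with ⟨a, ha⟩
  have hd : a ∈ pvSD u := (pvSD_mem u a).mpr ha
  obtain ⟨c, t, hsd⟩ := List.exists_cons_of_ne_nil (List.ne_nil_of_mem hd)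
  have hc : c ∈ u := (pvSD_mem u c).mp (by rw [hsd]; exact List.mem_cons_self)
  have hle : (pvErase t (u.erase c)).length ≤ (u.erase c).length := pvLen_foldl_erase_le t _
  have h1 : (u.erase c).length = u.length - 1 := List.length_erase_of_mem hc
  have hpos : 0 < u.length := List.length_pos_iff.mpr hu
  have hstep : pvErase (pvSD u) u = pvErase t (u.erase c) := by rw [hsd]; rfl
  rw [hstep]; omega

def pvCore (u : List Char) (asc : Bool) : List Char :=
  (if asc then pvSD u else (pvSD u).reverse) ++
    (if h : pvErase (pvSD u) u = [] then [] else pvCore (pvErase (pvSD u) u) (!asc))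
termination_by u.length
decreasing_by
  have hu : u ≠ [] := by intro e; subst e; exact h pvErase_nil_nil
  exact pvRound_lt u hu

theorem pvCore_nil (asc : Bool) : pvCore [] asc = [] := by
  rw [pvCore, dif_pos pvErase_nil_nil]
  simp [pvSD_nil]

theorem pvCore_step (u : List Char) (asc : Bool) :
    pvCore u asc = (if asc then pvSD u else (pvSD u).reverse) ++
      (if pvErase (pvSD u) u = [] then [] else pvCore (pvErase (pvSD u) u) (!asc)) := by
  rw [pvCore]
  by_cases h : pvErase (pvSD u) u = [] <;> simp [h]

-- ============ A side: the replace loop computes pvCore ============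
theorem pvLoopA_eq : ∀ (n : Nat) (s : List Char), s.length ≤ n → ∀ (res : List Char),
    sortStringLoop s res = res ++ pvCore s true := by
  intro n
  induction n with
  | zero =>
    intro s hs res
    have : s = [] := List.length_eq_zero_iff.mp (Nat.le_zero.mp hs)
    subst this
    rw [sortStringLoop]
    simp only [pvErase_def, pvSD_def]
    rw [dif_pos pvErase_nil_nil, pvCore_nil]
    simp [pvSD_nil]
  | succ n ih =>
    intro s hs res
    rw [sortStringLoop]
    simp only [pvErase_def, pvSD_def]
    rw [pvCore]
    by_cases h1 : pvErase (pvSD s) s = []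
    · rw [dif_pos h1, dif_pos h1]; simp
    · rw [dif_neg h1, dif_neg h1, pvCore]
      simp only [Bool.not_true, Bool.false_eq_true, if_false, if_true]
      by_cases h2 : pvErase (pvSD (pvErase (pvSD s) s)) (pvErase (pvSD s) s) = []
      · rw [dif_pos h2, dif_pos h2]; simp [List.append_assoc]
      · rw [dif_neg h2, dif_neg h2]
        have hne : s ≠ [] := by intro e; subst e; exact h1 pvErase_nil_nil
        have hlt1 : (pvErase (pvSD s) s).length < s.length := pvRound_lt s hne
        have hlt2 : (pvErase (pvSD (pvErase (pvSD s) s)) (pvErase (pvSD s) s)).length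
            < (pvErase (pvSD s) s).length := pvRound_lt _ h1
        rw [ih _ (by omega)]
        simp [List.append_assoc]

-- ============ B side: the count-table sweeps compute pvCore ============
theorem pvSweep_eq (ps : List (Char × Int)) :
    sweepAlt ps = (ps.map (fun p => if p.2 = 0 then p else (p.1, p.2 - 1)),
      (ps.filter (fun p => !(p.2 == 0))).map Prod.fst) := by
  induction ps with
  | nil => rfl
  | cons p ps ih =>
    obtain ⟨c, k⟩ := p
    by_cases hk : k = 0 <;> simp [sweepAlt, ih, hk]

theorem pvSD_eq_filter (d0 u : List Char) (hp : List.Pairwise (· < ·) d0)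
    (hsupp : ∀ c ∈ u, c ∈ d0) :
    pvSD u = d0.filter (fun c => !(u.count c == 0)) := by
  apply PySem.List.sorted_eq_of_perm_of_pairwise_lt
  · apply (List.perm_ext_iff_of_nodup ((hp.imp (fun h => ne_of_lt h)).filter _)
      (PySem.Set.nodup_ofList u)).mpr
    intro a
    simp only [List.mem_filter, PySem.Set.mem_ofList, Bool.not_eq_eq_eq_not, Bool.not_true,
      beq_eq_false_iff_ne, ne_eq]
    constructor
    · rintro ⟨_, hcount⟩
      have : 0 < u.count a := by omega
      exact List.count_pos_iff.mp this
    · intro ha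
      exact ⟨hsupp a ha, by have := List.count_pos_iff.mpr ha; omega⟩
  · exact List.Pairwise.filter _ hp

theorem pvMap_counts_update (d0 u : List Char) :
    (d0.map (fun c => (c, (u.count c : Int)))).map (fun p => if p.2 = 0 then p else (p.1, p.2 - 1))
      = d0.map (fun c => (c, ((pvErase (pvSD u) u).count c : Int))) := by
  rw [List.map_map]
  apply List.map_congr_left
  intro c _
  simp only [Function.comp]
  have hcnt := pvCount_erase (pvSD u) u c
  by_cases h : u.count c = 0
  · have hnm : c ∉ u := by simpa using List.count_eq_zero.mp h
    have hd : (pvSD u).count c = 0 := List.count_eq_zero.mpr (fun hm => hnm ((pvSD_mem u c).mp hm))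
    simp [h, hcnt, hd]
  · have hmem : c ∈ u := List.count_pos_iff.mp (by omega)
    have hd : (pvSD u).count c = 1 :=
      List.count_eq_one_of_mem (pvSD_nodup u) ((pvSD_mem u c).mpr hmem)
    have hne : ((u.count c : Int)) ≠ 0 := by exact_mod_cast h
    rw [if_neg hne, hcnt, hd]
    have h1 : 1 ≤ u.count c := by omega
    have : ((u.count c - 1 : Nat) : Int) = (u.count c : Int) - 1 := by
      push_cast [h1]; ring
    rw [this]

theorem pvAdd_eq (d0 u : List Char) (hp : List.Pairwise (· < ·) d0)
    (hsupp : ∀ c ∈ u, c ∈ d0) :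
    ((d0.map (fun c => (c, (u.count c : Int)))).filter (fun p => !(p.2 == 0))).map Prod.fst
      = pvSD u := by
  rw [List.filter_map, List.map_map]
  rw [pvSD_eq_filter d0 u hp hsupp]
  have hfe : ((fun p : Char × Int => !(p.2 == 0)) ∘ (fun c => (c, (u.count c : Int))))
      = (fun c => !(u.count c == 0)) := by
    funext c; by_cases h : u.count c = 0 <;> simp [h]
  rw [hfe]
  simp [Function.comp_def]

theorem pvLoopAlt_eq : ∀ (n fuel : Nat) (u d0 : List Char) (fwd : Bool) (out : List Char),
    List.Pairwise (· < ·) d0 → (∀ c ∈ u, c ∈ d0) → u.length ≤ n → u.length < fuel →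
    loopAlt fuel (d0.map (fun c => (c, (u.count c : Int)))) (u.length : Int) fwd out
      = out ++ pvCore u fwd := by
  intro n
  induction n with
  | zero =>
    intro fuel u d0 fwd out _ _ hn hf
    have hu : u = [] := List.length_eq_zero_iff.mp (Nat.le_zero.mp hn)
    subst hu
    cases fuel with
    | zero => omega
    | succ f => simp [loopAlt, pvCore_nil]
  | succ n ih =>
    intro fuel u d0 fwd out hp hsupp hn hf
    by_cases hu : u = []
    · subst hu
      cases fuel with
      | zero => omega
      | succ f => simp [loopAlt, pvCore_nil]
    · cases fuel with
      | zero => omega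
      | succ f =>
      have hrem : ((u.length : Int)) ≠ 0 := by
        have : u.length ≠ 0 := fun e => hu (List.length_eq_zero_iff.mp e)
        exact_mod_cast this
      have hsub : ∀ a ∈ pvSD u, a ∈ u := fun a ha => (pvSD_mem u a).mp ha
      have hdn : (pvSD u).Nodup := pvSD_nodup u
      have hdne : pvSD u ≠ [] := by
        rcases List.exists_mem_of_ne_nil u hu with ⟨a, ha⟩
        exact List.ne_nil_of_mem ((pvSD_mem u a).mpr ha)
      have hlen' : (pvErase (pvSD u) u).length = u.length - (pvSD u).length :=
        pvLen_erase (pvSD u) u hdn hsub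
      have hdlen : (pvSD u).length ≤ u.length := (List.subperm_of_subset hdn hsub).length_le
      have hdpos : 0 < (pvSD u).length := List.length_pos_iff.mpr hdne
      have hsupp' : ∀ c ∈ pvErase (pvSD u) u, c ∈ d0 :=
        fun c hc => hsupp c (pvMem_erase_mem _ _ _ hc)
      have hcast : (u.length : Int) - (((pvSD u).length : Nat) : Int)
          = ((pvErase (pvSD u) u).length : Int) := by
        rw [hlen', Nat.cast_sub hdlen]
      have hihlen : (pvErase (pvSD u) u).length ≤ n := by omega
      have hihfuel : (pvErase (pvSD u) u).length < f := by omega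
      cases fwd
      · -- backward sweep over pairs[::-1]
        show loopAlt (f + 1) _ _ false out = _
        simp only [loopAlt, if_neg hrem, Bool.false_eq_true, if_false]
        rw [← List.map_reverse, pvSweep_eq]
        simp only [List.map_reverse, List.filter_reverse, List.reverse_reverse,
          List.length_reverse]
        rw [pvMap_counts_update, pvAdd_eq d0 u hp hsupp]
        rw [hcast, ih f _ d0 true (out ++ (pvSD u).reverse) hp hsupp' hihlen hihfuel]
        rw [pvCore_step u false]
        simp only [Bool.not_false, Bool.false_eq_true, if_false]
        by_cases hu' : pvErase (pvSD u) u = []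
        · simp [hu', pvCore_nil]
        · simp [hu', List.append_assoc]
      · -- forward sweep
        show loopAlt (f + 1) _ _ true out = _
        simp only [loopAlt, if_neg hrem, if_true]
        rw [pvSweep_eq]
        rw [pvMap_counts_update, pvAdd_eq d0 u hp hsupp]
        rw [hcast, ih f _ d0 false (out ++ pvSD u) hp hsupp' hihlen hihfuel]
        rw [pvCore_step u true]
        simp only [Bool.not_true, if_true]
        by_cases hu' : pvErase (pvSD u) u = []
        · simp [hu', pvCore_nil]
        · simp [hu', List.append_assoc]

-- ===== VERDICT (by name: the statement is the Claim_ definition above) =====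
theorem sortString_spec : Claim_equal_sortString := by
  unfold Claim_equal_sortString
  intro s _
  unfold Spec_sortString
  simp only [sortString, sortString_alt, pvSD_def]
  rw [pvLoopA_eq s.toList.length s.toList le_rfl []]
  rw [pvLoopAlt_eq s.toList.length (s.toList.length + 1) s.toList (pvSD s.toList)
    true [] (pvSD_pairwise s.toList) (fun c hc => (pvSD_mem _ c).mpr hc) le_rfl
    (Nat.lt_succ_self _)]
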